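-- pv_equiv track=rewrite | github.com/muhammedmuflih/AI-Gmail-Phishing-Detector | ml_predictor.py | detect_category_fast
-- ===== SOURCE A (Python) =====
-- def detect_category_fast(text):
--     """
--     Fast category detection using simple keyword matching
--
--     Args:
--         text (str): Email text to analyze
--
--     Returns:
--         str: Detected category
--     """
--     text = str(text).lower()
--
--     # Simple keyword sets
--     job_keywords = {'job', 'work', 'interview', 'salary', 'hiring',
--                    'recruitment', 'career', 'resume', 'cv'}
--     shop_keywords = {'shopping', 'store', 'gift', 'voucher', 'coupon',
--                     'discount', 'sale', 'order', 'delivery'}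
--     bank_keywords = {'bank', 'account', 'credit', 'debit', 'payment',
--                     'transaction', 'balance', 'loan'}
--
--     # Count matches
--     job_count = sum(1 for kw in job_keywords if kw in text)
--     shop_count = sum(1 for kw in shop_keywords if kw in text)
--     bank_count = sum(1 for kw in bank_keywords if kw in text)
--
--     if job_count > shop_count and job_count > bank_count and job_count >= 2:
--         return 'job'
--     elif shop_count > job_count and shop_count > bank_count and shop_count >= 2:
--         return 'shopping'
--     elif bank_count > job_count and bank_count > shop_count and bank_count >= 2:
--         return 'banking'
--     else:
--         return 'general'
-- ===== SOURCE B (Python) =====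
-- # Text-driven scan: walk the text once and mark, at each position, which keywords
-- # start there; then score the three labels from the keyword->label table and pick
-- # the unique strict maximum (threshold 2), instead of A's per-keyword `in` tests
-- # and hard-coded three-way if-chain.
-- _KEYWORD_LABELS = {
--     'job': 'job', 'work': 'job', 'interview': 'job', 'salary': 'job',
--     'hiring': 'job', 'recruitment': 'job', 'career': 'job', 'resume': 'job',
--     'cv': 'job',
--     'shopping': 'shopping', 'store': 'shopping', 'gift': 'shopping',
--     'voucher': 'shopping', 'coupon': 'shopping', 'discount': 'shopping',
--     'sale': 'shopping', 'order': 'shopping', 'delivery': 'shopping',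
--     'bank': 'banking', 'account': 'banking', 'credit': 'banking',
--     'debit': 'banking', 'payment': 'banking', 'transaction': 'banking',
--     'balance': 'banking', 'loan': 'banking',
-- }
--
-- def detect_category_fast(text):
--     text = str(text).lower()
--     matched = set()
--     for i in range(len(text)):
--         for kw in _KEYWORD_LABELS:
--             if text.startswith(kw, i):
--                 matched.add(kw)
--     counts = {'job': 0, 'shopping': 0, 'banking': 0}
--     for kw, label in _KEYWORD_LABELS.items():
--         if kw in matched:
--             counts[label] += 1
--     best = max(counts.values())
--     winners = [label for label, c in counts.items() if c == best]
--     return winners[0] if len(winners) == 1 and best >= 2 else 'general'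
-- ===== Notes on version B (the rewrite author's own statement) =====
-- stated objective: alternative
-- what changed: Replaces A's per-keyword substring tests and hard-coded three-way if-chain with a single text-driven scan that marks which table keywords start at each position, then tallies labels from a keyword->label table and returns the unique strict maximum with threshold 2.
import Mathlib
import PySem

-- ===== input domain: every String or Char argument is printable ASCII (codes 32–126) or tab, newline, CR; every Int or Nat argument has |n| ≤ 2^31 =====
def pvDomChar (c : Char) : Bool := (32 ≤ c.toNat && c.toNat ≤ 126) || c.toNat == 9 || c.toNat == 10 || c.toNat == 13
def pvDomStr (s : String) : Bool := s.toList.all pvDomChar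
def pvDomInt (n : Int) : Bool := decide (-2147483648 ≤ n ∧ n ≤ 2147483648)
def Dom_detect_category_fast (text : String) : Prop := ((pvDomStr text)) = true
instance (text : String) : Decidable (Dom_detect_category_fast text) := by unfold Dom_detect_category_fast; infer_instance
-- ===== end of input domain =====

-- B replaces A's per-keyword `in` tests and hard-coded three-way if-chain by a single
-- text-driven scan (mark, at each position, which table keywords start there) followed by
-- a table-driven unique-strict-maximum-with-threshold decision; same return value.

-- ===== PORT A =====
def detect_category_fast (text : String) : String :=
  let text := PySem.Str.lower text
  let job_keywords : List String :=
    ["job", "work", "interview", "salary", "hiring", "recruitment", "career", "resume", "cv"]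
  let shop_keywords : List String :=
    ["shopping", "store", "gift", "voucher", "coupon", "discount", "sale", "order", "delivery"]
  let bank_keywords : List String :=
    ["bank", "account", "credit", "debit", "payment", "transaction", "balance", "loan"]
  let job_count := job_keywords.foldl (fun a kw => if PySem.Str.isIn kw text then a + 1 else a) 0
  let shop_count := shop_keywords.foldl (fun a kw => if PySem.Str.isIn kw text then a + 1 else a) 0
  let bank_count := bank_keywords.foldl (fun a kw => if PySem.Str.isIn kw text then a + 1 else a) 0
  if job_count > shop_count ∧ job_count > bank_count ∧ job_count ≥ 2 then "job"
  else if shop_count > job_count ∧ shop_count > bank_count ∧ shop_count ≥ 2 then "shopping"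
  else if bank_count > job_count ∧ bank_count > shop_count ∧ bank_count ≥ 2 then "banking"
  else "general"

-- ===== PORT B =====
-- the module-level _KEYWORD_LABELS dict (keyword -> label, insertion order)
def pvKeywordLabels : List (String × String) :=
  [("job", "job"), ("work", "job"), ("interview", "job"), ("salary", "job"),
   ("hiring", "job"), ("recruitment", "job"), ("career", "job"), ("resume", "job"),
   ("cv", "job"),
   ("shopping", "shopping"), ("store", "shopping"), ("gift", "shopping"),
   ("voucher", "shopping"), ("coupon", "shopping"), ("discount", "shopping"),
   ("sale", "shopping"), ("order", "shopping"), ("delivery", "shopping"),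
   ("bank", "banking"), ("account", "banking"), ("credit", "banking"),
   ("debit", "banking"), ("payment", "banking"), ("transaction", "banking"),
   ("balance", "banking"), ("loan", "banking")]

-- the scan loop: for i in range(len(text)): for kw in _KEYWORD_LABELS:
--   if text.startswith(kw, i): matched.add(kw)
-- text.startswith(kw, i) with 0 ≤ i < len(text) is exactly kw.toList <+: t.drop i,
-- i.e. PySem.Chars.startswith (t.drop i.toNat) kw.toList (exact on this index range)
def pvMatched (t : List Char) : PySem.Set String :=
  (PySem.List.pyRange 0 (t.length : Int) 1).foldl
    (fun S i => pvKeywordLabels.foldl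
      (fun S p => if PySem.Chars.startswith (List.drop i.toNat t) p.1.toList
                  then PySem.Set.add S p.1 else S) S)
    PySem.Set.empty

-- counts = {'job': 0, 'shopping': 0, 'banking': 0}
def pvCounts0 : PySem.Dict String Int :=
  ((PySem.Dict.empty.insert "job" 0).insert "shopping" 0).insert "banking" 0

-- the tally loop: for kw, label in _KEYWORD_LABELS.items(): if kw in matched: counts[label] += 1
def pvCounts (matched : PySem.Set String) : PySem.Dict String Int :=
  pvKeywordLabels.foldl
    (fun d p => if PySem.Set.contains matched p.1 then d.modify p.2 0 (· + 1) else d)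
    pvCounts0

def detect_category_fast_alt (text : String) : String :=
  let t : List Char := PySem.Chars.lower text.toList
  let matched := pvMatched t
  let counts := pvCounts matched
  let best : Int := match PySem.List.max? (PySem.Dict.values counts) (fun c => c) with
                    | some m => m
                    | none => 0   -- unreachable: counts always has three keys
  let winners := ((PySem.Dict.items counts).filter (fun p => p.2 == best)).map Prod.fst
  if winners.length = 1 ∧ best ≥ 2 then
    match winners with
    | w :: _ => w
    | [] => "general"   -- unreachable under the guard (winners[0] in Python)
  else "general"

-- ===== PRECONDITION & SPEC =====
def Spec_detect_category_fast (text : String) (out : String) : Prop := out = detect_category_fast_alt text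
instance (text : String) (out : String) : Decidable (Spec_detect_category_fast text out) := by unfold Spec_detect_category_fast; infer_instance

-- ===== CLAIM (what is proved, stated in full; the proofs are below) =====
def Claim_equal_detect_category_fast : Prop := ∀ (text : String), Dom_detect_category_fast text → Spec_detect_category_fast text (detect_category_fast text)

-- ===== LEMMAS AND PROOFS =====
def pvJobKws : List String :=
  ["job", "work", "interview", "salary", "hiring", "recruitment", "career", "resume", "cv"]
def pvShopKws : List String :=
  ["shopping", "store", "gift", "voucher", "coupon", "discount", "sale", "order", "delivery"]
def pvBankKws : List String :=
  ["bank", "account", "credit", "debit", "payment", "transaction", "balance", "loan"]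

def pvCnt (kws : List String) (t : List Char) : Nat :=
  (kws.filter (fun kw => PySem.Chars.isIn kw.toList t)).length

theorem pv_KL_decomp :
    pvKeywordLabels
      = (pvJobKws.map (fun kw => (kw, "job")))
        ++ (pvShopKws.map (fun kw => (kw, "shopping")))
        ++ (pvBankKws.map (fun kw => (kw, "banking"))) := rfl

-- A's counting loop is the length of a filter
theorem pv_foldl_count {α : Type} (p : α → Bool) (l : List α) (a : Nat) :
    l.foldl (fun a x => if p x then a + 1 else a) a = a + (l.filter p).length := by
  induction l generalizing a with
  | nil => simp
  | cons x t ih => by_cases h : p x <;> simp [List.foldl, List.filter, h, ih] <;> omega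

-- membership through the inner keyword loop of the scan
theorem pv_mem_foldl_add_if {α : Type} (f : α → String) (q : α → Bool) (l : List α)
    (S : PySem.Set String) (y : String) :
    y ∈ l.foldl (fun S a => if q a then PySem.Set.add S (f a) else S) S
      ↔ y ∈ S ∨ ∃ a ∈ l, q a = true ∧ y = f a := by
  induction l generalizing S with
  | nil => simp
  | cons a l ih =>
    by_cases h : q a = true <;>
      simp [List.foldl_cons, h, ih, PySem.Set.mem_add] <;> tauto

-- membership through the whole position scan
theorem pv_mem_scan (t : List Char) (l : List Int) (S : PySem.Set String) (y : String) :
    y ∈ l.foldl (fun S i => pvKeywordLabels.foldl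
        (fun S p => if PySem.Chars.startswith (List.drop i.toNat t) p.1.toList
                    then PySem.Set.add S p.1 else S) S) S
      ↔ y ∈ S ∨ ∃ i ∈ l, ∃ p ∈ pvKeywordLabels,
          PySem.Chars.startswith (List.drop i.toNat t) p.1.toList = true ∧ y = p.1 := by
  induction l generalizing S with
  | nil => simp
  | cons i l ih =>
    simp only [List.foldl_cons, ih, pv_mem_foldl_add_if, List.mem_cons]
    aesop

-- a keyword is collected by the scan iff it is a substring ('kw in text')
theorem pv_contains_matched (t : List Char) (kw : String)
    (hmem : kw ∈ pvKeywordLabels.map Prod.fst) (hne : kw.toList ≠ []) :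
    PySem.Set.contains (pvMatched t) kw = PySem.Chars.isIn kw.toList t := by
  rw [Bool.eq_iff_iff, PySem.Set.contains_iff]
  unfold pvMatched
  rw [pv_mem_scan]
  simp only [PySem.Set.empty, List.not_mem_nil, false_or]
  constructor
  · rintro ⟨i, hi, p, hp, hsw, rfl⟩
    rw [PySem.Chars.isIn_iff_infix]
    exact ((PySem.Chars.startswith_iff _ _).mp hsw).isInfix.trans (List.drop_suffix _ _).isInfix
  · intro h
    rw [← PySem.Chars.exists_prefix_drop_iff_isIn] at h
    obtain ⟨j, hj⟩ := h
    have hjlt : j < t.length := by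
      by_contra hge
      push Not at hge
      rw [List.drop_eq_nil_iff.mpr hge, List.prefix_nil] at hj
      exact hne hj
    obtain ⟨p, hp, hpeq⟩ := List.mem_map.mp hmem
    refine ⟨(j : Int), ?_, p, hp, ?_, hpeq.symm⟩
    · exact PySem.List.mem_pyRange_one.mpr ⟨Int.natCast_nonneg j, by exact_mod_cast hjlt⟩
    · rw [PySem.Chars.startswith_iff, hpeq, Int.toNat_natCast]
      exact hj

-- getD through the conditional tally loop
theorem pv_getD_count_fold (l : List (String × String)) (q : String × String → Bool)
    (d : PySem.Dict String Int) (L : String) :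
    (l.foldl (fun d p => if q p then d.modify p.2 0 (· + 1) else d) d).getD L 0
      = d.getD L 0 + (((l.filter q).map Prod.snd).count L : Int) := by
  induction l generalizing d with
  | nil => simp
  | cons a l ih =>
    simp only [List.foldl_cons, List.filter_cons]
    by_cases h : q a = true
    · rw [if_pos h, if_pos h, ih, PySem.Dict.getD_modify]
      by_cases hL : L = a.2
      · subst hL
        simp [List.count_cons]
        omega
      · have : (a.2 == L) = false := by
          simp [Ne.symm hL]
        simp [hL, List.count_cons, this]
    · rw [if_neg h, if_neg h, ih]

-- keys are unchanged by the tally loop when every label is already a key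
theorem pv_keys_count_fold (l : List (String × String)) (q : String × String → Bool)
    (d : PySem.Dict String Int) (h : ∀ p ∈ l, p.2 ∈ d.keys) :
    (l.foldl (fun d p => if q p then d.modify p.2 0 (· + 1) else d) d).keys = d.keys := by
  induction l generalizing d with
  | nil => rfl
  | cons a l ih =>
    simp only [List.foldl_cons]
    by_cases hq : q a = true
    · rw [if_pos hq]
      have hk : (d.modify a.2 0 (· + 1)).keys = d.keys := by
        rw [PySem.Dict.keys_modify, PySem.Dict.keys_insert_of_contains]
        exact (PySem.Dict.contains_iff_mem_keys _ _).mpr (h a List.mem_cons_self)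
      rw [ih _ (fun p hp => by rw [hk]; exact h p (List.mem_cons_of_mem _ hp)), hk]
    · rw [if_neg hq]
      exact ih _ (fun p hp => h p (List.mem_cons_of_mem _ hp))

-- counting a label over its own segment of the table
theorem pv_count_label (t : List Char) (kws : List String) (L : String) :
    (((kws.map (fun kw => (kw, L))).filter
        (fun p => PySem.Chars.isIn p.1.toList t)).map Prod.snd).count L
      = (kws.filter (fun kw => PySem.Chars.isIn kw.toList t)).length := by
  induction kws with
  | nil => simp
  | cons k kws ih =>
    by_cases h : PySem.Chars.isIn k.toList t = true <;>
      simp [h, ih]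

-- a segment of the table contributes nothing to a different label
theorem pv_count_label_ne (t : List Char) (kws : List String) {L L' : String}
    (h : (L == L') = false) :
    (((kws.map (fun kw => (kw, L))).filter
        (fun p => PySem.Chars.isIn p.1.toList t)).map Prod.snd).count L' = 0 := by
  induction kws with
  | nil => simp
  | cons k kws ih =>
    by_cases hc : PySem.Chars.isIn k.toList t = true <;>
      simp [hc, List.count_cons, h, ih]

-- the tally dict, in closed form
theorem pv_counts_items (t : List Char) :
    (pvCounts (pvMatched t)).items
      = [("job", (pvCnt pvJobKws t : Int)), ("shopping", (pvCnt pvShopKws t : Int)),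
         ("banking", (pvCnt pvBankKws t : Int))] := by
  have hcong : pvCounts (pvMatched t)
      = pvKeywordLabels.foldl
          (fun d p => if PySem.Chars.isIn p.1.toList t then d.modify p.2 0 (· + 1) else d)
          pvCounts0 := by
    unfold pvCounts
    refine PySem.List.foldl_congr_mem _ _ _ _ ?_
    intro acc p hp
    rw [pv_contains_matched t p.1 (List.mem_map_of_mem hp)
      (by revert hp; revert p; decide)]
  have hkeys : (pvCounts (pvMatched t)).keys = ["job", "shopping", "banking"] := by
    rw [hcong, pv_keys_count_fold _ _ _ (by decide)]
    decide
  have hgetD : ∀ L : String, (pvCounts (pvMatched t)).getD L 0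
      = pvCounts0.getD L 0
        + (((pvKeywordLabels.filter (fun p => PySem.Chars.isIn p.1.toList t)).map
              Prod.snd).count L : Int) := by
    intro L
    rw [hcong, pv_getD_count_fold]
  rw [PySem.Dict.items_eq_map_keys _ (by rw [hkeys]; decide) 0, hkeys]
  have h0 : ∀ L : String, pvCounts0.getD L 0 = 0 := by
    intro L
    unfold pvCounts0
    simp only [PySem.Dict.getD_insert, PySem.Dict.getD_empty]
    split_ifs <;> rfl
  simp only [List.map_cons, List.map_nil, hgetD, h0, pv_KL_decomp, List.filter_append,
    List.map_append, List.count_append, pv_count_label, pvCnt,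
    pv_count_label_ne t pvJobKws (show (("job" : String) == "shopping") = false from by decide),
    pv_count_label_ne t pvJobKws (show (("job" : String) == "banking") = false from by decide),
    pv_count_label_ne t pvShopKws (show (("shopping" : String) == "job") = false from by decide),
    pv_count_label_ne t pvShopKws (show (("shopping" : String) == "banking") = false from by decide),
    pv_count_label_ne t pvBankKws (show (("banking" : String) == "job") = false from by decide),
    pv_count_label_ne t pvBankKws (show (("banking" : String) == "shopping") = false from by decide)]
  norm_num

-- the two decision rules agree for any (bounded) triple of keyword counts
theorem pv_decision_eq (j s b : Nat) (Hj : j ≤ 9) (Hs : s ≤ 9) (Hb : b ≤ 8) :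
    (if j > s ∧ j > b ∧ j ≥ 2 then "job"
     else if s > j ∧ s > b ∧ s ≥ 2 then "shopping"
     else if b > j ∧ b > s ∧ b ≥ 2 then "banking"
     else "general")
    =
    (let best : Int := [(s : Int), (b : Int)].foldl max (j : Int)
     let winners := (([("job", (j : Int)), ("shopping", (s : Int)),
                       ("banking", (b : Int))].filter (fun p => p.2 == best)).map Prod.fst)
     if winners.length = 1 ∧ best ≥ 2 then
       (match winners with | w :: _ => w | [] => "general")
     else "general") := by
  interval_cases j <;> interval_cases s <;> interval_cases b <;> decide

set_option maxHeartbeats 2000000 in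
theorem pv_main (text : String) :
    detect_category_fast text = detect_category_fast_alt text := by
  unfold detect_category_fast detect_category_fast_alt
  simp only [pv_counts_items, PySem.Dict.values, PySem.Str.isIn_eq, PySem.Str.toList_lower,
    pv_foldl_count, Nat.zero_add, List.map_cons, List.map_nil, PySem.List.max?_id_cons]
  exact pv_decision_eq _ _ _ (List.length_filter_le _ _) (List.length_filter_le _ _)
    (List.length_filter_le _ _)

-- ===== VERDICT (by name: the statement is the Claim_ definition above) =====
theorem detect_category_fast_spec : Claim_equal_detect_category_fast := by
  intro text _
  exact pv_main text
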